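-- pv_equiv track=rewrite | github.com/merabytes/secrets-lambda | bundle_repo_secrets.py | group_by_region
-- ===== SOURCE A (Python) =====
-- from typing import Dict, Tuple, List
--
-- def group_by_region(flat: Dict[str, str]) -> Dict[str, Dict[str, str]]:
--     """
--     Turn VARS like NORTHCENTRALUS_AZURE_CLIENT_ID into:
--     {
--       "NORTHCENTRALUS": {"AZURE_CLIENT_ID": "..."},
--       ...
--     }
--     If a name has no underscore, it goes under region 'DEFAULT' with the full name as key.
--     """
--     grouped: Dict[str, Dict[str, str]] = {}
--     for full, val in flat.items():
--         if "_" in full: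
--             region, key = full.split("_", 1)
--         else:
--             region, key = "DEFAULT", full
--         bucket = grouped.setdefault(region, {})
--         bucket[key] = val
--     return grouped
-- ===== SOURCE B (Python) =====
-- from typing import Dict
--
-- def group_by_region(flat: Dict[str, str]) -> Dict[str, Dict[str, str]]:
--     def split_rk(full):
--         return tuple(full.split("_", 1)) if "_" in full else ("DEFAULT", full)
--     triples = [(*split_rk(full), val) for full, val in flat.items()]
--     regions = list(dict.fromkeys(r for r, _, _ in triples))
--     return {r: {k: v for r2, k, v in triples if r2 == r} for r in regions}
-- ===== Notes on version B (the rewrite author's own statement) =====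
-- stated objective: alternative
-- what changed: Replaces A's single-pass setdefault/mutate accumulation with a two-phase build: first materialize (region, key, value) triples, then list the distinct regions in first-occurrence order, then construct each region's inner dict in a separate filtered pass.
import Mathlib
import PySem

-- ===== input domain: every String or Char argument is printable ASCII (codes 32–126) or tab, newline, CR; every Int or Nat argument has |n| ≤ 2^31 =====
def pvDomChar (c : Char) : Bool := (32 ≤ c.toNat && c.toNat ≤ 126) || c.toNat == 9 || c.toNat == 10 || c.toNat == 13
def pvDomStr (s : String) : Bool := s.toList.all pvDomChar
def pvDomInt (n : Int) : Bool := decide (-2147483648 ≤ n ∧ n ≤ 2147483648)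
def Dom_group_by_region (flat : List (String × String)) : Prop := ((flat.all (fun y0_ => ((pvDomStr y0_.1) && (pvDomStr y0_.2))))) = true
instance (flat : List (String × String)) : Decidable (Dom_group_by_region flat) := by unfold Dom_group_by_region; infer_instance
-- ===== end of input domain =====

-- B replaces A's one-pass setdefault accumulation by a two-phase build (triples, then region list,
-- then one inner dict per region); objective: alternative decomposition, same observable result.

-- ===== PORT A =====
-- shared helper: region,key = full.split('_',1) if '_' in full else ('DEFAULT', full)
-- (identical source expression in Source A's loop body and in Source B's split_rk helper)
def splitRK (full : String) : String × String :=
  if PySem.Str.isIn "_" full then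
    match PySem.Str.splitMax? full "_" 1 with
    | some (r :: k :: _) => (r, k)
    | _ => ("DEFAULT", full)   -- unreachable: split with nonempty sep yields ≥ 2 parts when sep occurs
  else ("DEFAULT", full)

-- one iteration of A's loop: bucket = grouped.setdefault(region, {}); bucket[key] = val
def stepA (grouped : PySem.Dict String (PySem.Dict String String)) (p : String × String) :
    PySem.Dict String (PySem.Dict String String) :=
  let rk := splitRK p.1
  let g1 := grouped.setdefault rk.1 PySem.Dict.empty
  let bucket := g1.getD rk.1 PySem.Dict.empty
  g1.insert rk.1 (bucket.insert rk.2 p.2)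

def group_by_region (flat : List (String × String)) : List (String × List (String × String)) :=
  (flat.foldl stepA PySem.Dict.empty).items.map (fun q => (q.1, q.2.items))

-- ===== PORT B =====
-- the inner dict comprehension {k: v for r2, k, v in triples if r2 == r}
def innerDict (ts : List (String × String × String)) (r : String) : PySem.Dict String String :=
  ts.foldl (fun d t => if t.1 == r then d.insert t.2.1 t.2.2 else d) PySem.Dict.empty

def group_by_region_alt (flat : List (String × String)) : List (String × List (String × String)) :=
  let ts := flat.map (fun p => ((splitRK p.1).1, (splitRK p.1).2, p.2))
  let regions := PySem.List.dedup (ts.map (·.1))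
  regions.map (fun r => (r, (innerDict ts r).items))

-- ===== PRECONDITION & SPEC =====
def Spec_group_by_region (flat : List (String × String)) (out : List (String × List (String × String))) : Prop := out = group_by_region_alt flat
instance (flat : List (String × String)) (out : List (String × List (String × String))) : Decidable (Spec_group_by_region flat out) := by unfold Spec_group_by_region; infer_instance

-- ===== CLAIM (what is proved, stated in full; the proofs are below) =====
def Claim_equal_group_by_region : Prop := ∀ (flat : List (String × String)), Dom_group_by_region flat → Spec_group_by_region flat (group_by_region flat)

-- ===== LEMMAS AND PROOFS =====

-- if region r never occurs, the inner fold never fires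
theorem innerDict_of_not_mem (ts : List (String × String × String)) (r : String)
    (h : r ∉ ts.map (·.1)) : innerDict ts r = PySem.Dict.empty := by
  unfold innerDict
  induction ts with
  | nil => rfl
  | cons t ts ih =>
    simp only [List.map_cons, List.mem_cons, not_or] at h
    simp only [List.foldl_cons]
    rw [if_neg (by simp only [beq_iff_eq]; exact fun e => h.1 e.symm)]
    exact ih h.2

theorem innerDict_append (ts : List (String × String × String)) (t : String × String × String)
    (r : String) :
    innerDict (ts ++ [t]) r =
      if t.1 == r then (innerDict ts r).insert t.2.1 t.2.2 else innerDict ts r := by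
  unfold innerDict
  rw [List.foldl_append]
  simp

-- core invariant: the items of A's accumulated dict are exactly B's region-indexed assembly
theorem fold_items (ts : List (String × String × String)) :
    (ts.foldl (fun g t =>
        (g.setdefault t.1 PySem.Dict.empty).insert t.1
          (((g.setdefault t.1 PySem.Dict.empty).getD t.1 PySem.Dict.empty).insert t.2.1 t.2.2))
      PySem.Dict.empty).items
    = (PySem.List.dedup (ts.map (·.1))).map (fun r => (r, innerDict ts r)) := by
  induction ts using List.reverseRecOn with
  | nil => rfl
  | append_singleton l t ih =>
    rw [List.foldl_append, List.foldl_cons, List.foldl_nil]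
    set G := l.foldl (fun g t =>
        (g.setdefault t.1 PySem.Dict.empty).insert t.1
          (((g.setdefault t.1 PySem.Dict.empty).getD t.1 PySem.Dict.empty).insert t.2.1 t.2.2))
      PySem.Dict.empty with hG
    set R := PySem.List.dedup (l.map (·.1)) with hR
    have hkeys : G.keys = R := by
      rw [show G.keys = G.items.map (·.1) from rfl, ih, List.map_map]
      simp [Function.comp_def]
    have hnodupR : R.Nodup := PySem.List.nodup_dedup _
    have hded : PySem.List.dedup ((l ++ [t]).map (·.1)) = PySem.Set.add R t.1 := by
      simp only [hR, List.map_append, List.map_cons, List.map_nil, PySem.List.dedup_eq_ofList,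
        PySem.Set.ofList_eq_foldl, List.foldl_append, List.foldl_cons, List.foldl_nil]
    by_cases hmem : t.1 ∈ R
    · have hcon : G.contains t.1 = true := by
        rw [PySem.Dict.contains_eq_decide_mem_keys, hkeys]; simpa using hmem
      rw [PySem.Dict.setdefault_of_contains _ _ hcon]
      have hbucket : G.getD t.1 PySem.Dict.empty = innerDict l t.1 := by
        exact PySem.Dict.getD_of_mem_items _ (by rw [ih]; exact List.mem_map_of_mem hmem)
          (by rw [hkeys]; exact hnodupR) _
      rw [hbucket, PySem.Dict.items_insert_of_contains _ _ hcon, ih, List.map_map, hded,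
        PySem.Set.add]
      rw [if_pos (by simpa using hmem)]
      apply List.map_congr_left
      intro r hr
      by_cases h : r = t.1
      · subst h
        simp [innerDict_append]
      · simp only [Function.comp_apply]
        rw [if_neg (by simpa using h), innerDict_append,
          if_neg (by simp only [beq_iff_eq]; exact fun e => h e.symm)]
    · have hcon : G.contains t.1 = false := by
        rw [PySem.Dict.contains_eq_decide_mem_keys, hkeys]; simpa using hmem
      rw [PySem.Dict.setdefault_of_not_contains _ _ hcon, PySem.Dict.getD_insert_self,
        PySem.Dict.insert_insert_self]
      have hnotl : t.1 ∉ l.map (·.1) := fun h => hmem ((PySem.List.mem_dedup _ _).mpr h)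
      have hcon2 : G.contains t.1 = false := hcon
      rw [PySem.Dict.items_insert_of_not_contains _ _ hcon2, ih, hded, PySem.Set.add]
      rw [if_neg (by simpa using hmem), List.map_append]
      congr 1
      · apply List.map_congr_left
        intro r hr
        rw [innerDict_append,
          if_neg (by simp only [beq_iff_eq]; exact fun e => hmem (e ▸ hr))]
      · simp only [List.map_cons, List.map_nil]
        rw [innerDict_append, if_pos (by simp), innerDict_of_not_mem _ _ hnotl]

-- ===== VERDICT (by name: the statement is the Claim_ definition above) =====
theorem group_by_region_spec : Claim_equal_group_by_region := by
  intro flat _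
  unfold Spec_group_by_region group_by_region group_by_region_alt
  have h1 : flat.foldl stepA PySem.Dict.empty
      = (flat.map (fun p => ((splitRK p.1).1, (splitRK p.1).2, p.2))).foldl (fun g t =>
          (g.setdefault t.1 PySem.Dict.empty).insert t.1
            (((g.setdefault t.1 PySem.Dict.empty).getD t.1 PySem.Dict.empty).insert t.2.1 t.2.2))
        PySem.Dict.empty := by
    rw [List.foldl_map]
    rfl
  rw [h1, fold_items, List.map_map]
  rfl
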